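-- pv_equiv track=rewrite | github.com/Rhysoshea/Algos | Genome/k_optimal.py | isOptimized
-- ===== SOURCE A (Python) =====
-- def isOptimized(k, reads):
-- 	kmers = set()
-- 	for read in reads:
-- 		for i in range(0, len(read)-k+1):
-- 			kmers.add(read[i:i+k])
-- 	prefixes = set()
-- 	suffixes = set()
-- 	for kmer in kmers:
-- 		prefixes.add(kmer[:-1])
-- 		suffixes.add(kmer[1:])
-- 	return prefixes == suffixes
-- ===== SOURCE B (Python) =====
-- def isOptimized(k, reads):
--     # Role table: each (k-1)-string maps to a pair of flags (seen as prefix,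
--     # seen as suffix).  The prefix set equals the suffix set iff every string
--     # that occurs in either role occurs in both.
--     roles = {}
--     for read in reads:
--         for i in range(0, len(read) - k + 1):
--             kmer = read[i:i + k]
--             p = roles.get(kmer[:-1], (False, False))
--             roles[kmer[:-1]] = (True, p[1])
--             s = roles.get(kmer[1:], (False, False))
--             roles[kmer[1:]] = (s[0], True)
--     return all(a and b for a, b in roles.values())
-- ===== Notes on version B (the rewrite author's own statement) =====
-- stated objective: alternative
-- what changed: Replaces A's two-set construction and set comparison by a single role table: one dict maps each (k-1)-string to a (seen-as-prefix, seen-as-suffix) flag pair filled in one pass over the read windows, and the answer is whether every entry carries both flags (every element of either set is in both iff the sets are equal).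
import Mathlib
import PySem

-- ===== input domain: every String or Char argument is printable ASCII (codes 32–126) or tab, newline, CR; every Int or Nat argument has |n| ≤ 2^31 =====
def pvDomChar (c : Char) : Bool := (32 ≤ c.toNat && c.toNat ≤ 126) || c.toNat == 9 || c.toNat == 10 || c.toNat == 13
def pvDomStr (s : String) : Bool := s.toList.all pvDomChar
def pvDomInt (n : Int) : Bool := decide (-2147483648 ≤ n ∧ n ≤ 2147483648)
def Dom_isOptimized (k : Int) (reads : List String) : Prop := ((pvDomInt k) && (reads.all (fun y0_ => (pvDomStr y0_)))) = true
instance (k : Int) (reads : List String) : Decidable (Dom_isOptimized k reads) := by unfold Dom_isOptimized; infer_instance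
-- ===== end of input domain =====

-- B replaces A's two sets compared at the end by one role table: a dict mapping each
-- (k-1)-string to (seen-as-prefix, seen-as-suffix) flags, answering whether every
-- entry has both flags (objective: alternative data structure, same cost).

-- ===== PORT A =====
def isOptimized (k : Int) (reads : List String) : Bool :=
  let kmers : PySem.Set String :=
    reads.foldl (fun kmers read =>
      (PySem.List.pyRange 0 (PySem.Str.len read - k + 1) 1).foldl
        (fun kmers i => PySem.Set.add kmers (PySem.Str.slice read (some i) (some (i + k))))
        kmers)
      PySem.Set.empty
  let ps : PySem.Set String × PySem.Set String :=
    kmers.foldl (fun ps kmer =>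
      (PySem.Set.add ps.1 (PySem.Str.slice kmer none (some (-1))),
       PySem.Set.add ps.2 (PySem.Str.slice kmer (some 1) none)))
      (PySem.Set.empty, PySem.Set.empty)
  PySem.Set.equal ps.1 ps.2

-- ===== PORT B =====
-- the (k-1)-prefix and (k-1)-suffix of the window of `read` at position `i`
def pvPrefix (k : Int) (read : String) (i : Int) : String :=
  PySem.Str.slice (PySem.Str.slice read (some i) (some (i + k))) none (some (-1))
def pvSuffix (k : Int) (read : String) (i : Int) : String :=
  PySem.Str.slice (PySem.Str.slice read (some i) (some (i + k))) (some 1) none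

-- body of B's inner loop: record the window's prefix and suffix roles in the table
def pvStep (k : Int) (read : String) (d : PySem.Dict String (Bool × Bool)) (i : Int) :
    PySem.Dict String (Bool × Bool) :=
  let p := d.getD (pvPrefix k read i) (false, false)
  let d1 := d.insert (pvPrefix k read i) (true, p.2)
  let s := d1.getD (pvSuffix k read i) (false, false)
  d1.insert (pvSuffix k read i) (s.1, true)

def isOptimized_alt (k : Int) (reads : List String) : Bool :=
  let roles : PySem.Dict String (Bool × Bool) :=
    reads.foldl (fun d read =>
      (PySem.List.pyRange 0 (PySem.Str.len read - k + 1) 1).foldl (pvStep k read) d)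
      PySem.Dict.empty
  roles.values.all (fun v => v.1 && v.2)

-- ===== PRECONDITION & SPEC =====
def Spec_isOptimized (k : Int) (reads : List String) (out : Bool) : Prop := out = isOptimized_alt k reads
instance (k : Int) (reads : List String) (out : Bool) : Decidable (Spec_isOptimized k reads out) := by unfold Spec_isOptimized; infer_instance

-- ===== CLAIM (what is proved, stated in full; the proofs are below) =====
def Claim_equal_isOptimized : Prop := ∀ (k : Int) (reads : List String), Dom_isOptimized k reads → Spec_isOptimized k reads (isOptimized k reads)

-- ===== LEMMAS AND PROOFS =====

-- the two role predicates: x occurs as a window prefix / suffix somewhere in reads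
def pvInP (k : Int) (reads : List String) (x : String) : Prop :=
  ∃ r ∈ reads, ∃ i ∈ PySem.List.pyRange 0 (PySem.Str.len r - k + 1) 1, x = pvPrefix k r i
def pvInS (k : Int) (reads : List String) (x : String) : Prop :=
  ∃ r ∈ reads, ∃ i ∈ PySem.List.pyRange 0 (PySem.Str.len r - k + 1) 1, x = pvSuffix k r i

-- membership in a Set built by folding `add ∘ f` over a list
theorem pv_mem_foldl_add {α β : Type} [BEq α] [LawfulBEq α]
    (l : List β) (f : β → α) (s : PySem.Set α) (x : α) :
    x ∈ l.foldl (fun s e => PySem.Set.add s (f e)) s ↔ x ∈ s ∨ ∃ e ∈ l, x = f e := by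
  induction l generalizing s with
  | nil => simp
  | cons h t ih =>
    simp [List.foldl_cons, ih, PySem.Set.mem_add]
    tauto

-- membership in a Set built by the nested (read, window) loop
theorem pv_mem_foldl_add2 {α : Type} [BEq α] [LawfulBEq α]
    (reads : List String) (g : String → List Int) (f : String → Int → α)
    (s : PySem.Set α) (x : α) :
    x ∈ reads.foldl (fun s r => (g r).foldl (fun s i => PySem.Set.add s (f r i)) s) s ↔
      x ∈ s ∨ ∃ r ∈ reads, ∃ i ∈ g r, x = f r i := by
  induction reads generalizing s with
  | nil => simp
  | cons h t ih =>
    simp [List.foldl_cons, ih, pv_mem_foldl_add]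
    exact or_assoc

-- getD through one pvStep: each flag is OR-ed with "x is this window's prefix / suffix"
theorem pv_getD_step (k : Int) (r : String) (d : PySem.Dict String (Bool × Bool))
    (i : Int) (x : String) :
    (pvStep k r d i).getD x (false, false) =
      ((d.getD x (false, false)).1 || decide (x = pvPrefix k r i),
       (d.getD x (false, false)).2 || decide (x = pvSuffix k r i)) := by
  unfold pvStep
  simp only [PySem.Dict.getD_insert]
  by_cases hs : x = pvSuffix k r i <;> by_cases hp : x = pvPrefix k r i
  · simp only [← hs, ← hp]; simp
  · simp only [← hs]; simp [hp]
  · simp only [← hp]; simp [hs]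
  · simp [hs, hp]

-- the prefix flag through the inner window loop
theorem pv_getD_inner1 (k : Int) (r : String) (l : List Int)
    (d : PySem.Dict String (Bool × Bool)) (x : String) :
    ((l.foldl (pvStep k r) d).getD x (false, false)).1 = true ↔
      (d.getD x (false, false)).1 = true ∨ ∃ i ∈ l, x = pvPrefix k r i := by
  induction l generalizing d with
  | nil => simp
  | cons a t ih =>
    rw [List.foldl_cons, ih]
    simp [pv_getD_step, or_assoc]

-- the suffix flag through the inner window loop
theorem pv_getD_inner2 (k : Int) (r : String) (l : List Int)
    (d : PySem.Dict String (Bool × Bool)) (x : String) :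
    ((l.foldl (pvStep k r) d).getD x (false, false)).2 = true ↔
      (d.getD x (false, false)).2 = true ∨ ∃ i ∈ l, x = pvSuffix k r i := by
  induction l generalizing d with
  | nil => simp
  | cons a t ih =>
    rw [List.foldl_cons, ih]
    simp [pv_getD_step, or_assoc]

-- the prefix flag through the whole outer loop
theorem pv_getD_outer1 (k : Int) (reads : List String)
    (d : PySem.Dict String (Bool × Bool)) (x : String) :
    ((reads.foldl (fun d read =>
        (PySem.List.pyRange 0 (PySem.Str.len read - k + 1) 1).foldl (pvStep k read) d) d).getD
        x (false, false)).1 = true ↔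
      (d.getD x (false, false)).1 = true ∨ pvInP k reads x := by
  induction reads generalizing d with
  | nil => simp [pvInP]
  | cons a t ih =>
    rw [List.foldl_cons, ih, pv_getD_inner1]
    simp [pvInP, or_assoc]

-- the suffix flag through the whole outer loop
theorem pv_getD_outer2 (k : Int) (reads : List String)
    (d : PySem.Dict String (Bool × Bool)) (x : String) :
    ((reads.foldl (fun d read =>
        (PySem.List.pyRange 0 (PySem.Str.len read - k + 1) 1).foldl (pvStep k read) d) d).getD
        x (false, false)).2 = true ↔
      (d.getD x (false, false)).2 = true ∨ pvInS k reads x := by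
  induction reads generalizing d with
  | nil => simp [pvInS]
  | cons a t ih =>
    rw [List.foldl_cons, ih, pv_getD_inner2]
    simp [pvInS, or_assoc]

-- keys through the loops: exactly the strings occurring in some role
theorem pv_keys_step (k : Int) (r : String) (d : PySem.Dict String (Bool × Bool))
    (i : Int) (x : String) :
    x ∈ (pvStep k r d i).keys ↔ x ∈ d.keys ∨ x = pvPrefix k r i ∨ x = pvSuffix k r i := by
  unfold pvStep
  rw [PySem.Dict.mem_keys_insert, PySem.Dict.mem_keys_insert]
  constructor
  · rintro (h | h | h)
    · exact Or.inr (Or.inr h)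
    · exact Or.inr (Or.inl h)
    · exact Or.inl h
  · rintro (h | h | h)
    · exact Or.inr (Or.inr h)
    · exact Or.inr (Or.inl h)
    · exact Or.inl h

theorem pv_keys_inner (k : Int) (r : String) (l : List Int)
    (d : PySem.Dict String (Bool × Bool)) (x : String) :
    x ∈ (l.foldl (pvStep k r) d).keys ↔
      x ∈ d.keys ∨ ∃ i ∈ l, x = pvPrefix k r i ∨ x = pvSuffix k r i := by
  induction l generalizing d with
  | nil => simp
  | cons a t ih =>
    rw [List.foldl_cons, ih]
    simp only [pv_keys_step, List.exists_mem_cons_iff, or_assoc]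

theorem pv_keys_outer (k : Int) (reads : List String)
    (d : PySem.Dict String (Bool × Bool)) (x : String) :
    x ∈ (reads.foldl (fun d read =>
        (PySem.List.pyRange 0 (PySem.Str.len read - k + 1) 1).foldl (pvStep k read) d) d).keys ↔
      x ∈ d.keys ∨ ∃ r ∈ reads, ∃ i ∈ PySem.List.pyRange 0 (PySem.Str.len r - k + 1) 1,
        x = pvPrefix k r i ∨ x = pvSuffix k r i := by
  induction reads generalizing d with
  | nil => simp
  | cons a t ih =>
    rw [List.foldl_cons, ih]
    simp only [pv_keys_inner, List.exists_mem_cons_iff, or_assoc]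

-- a string occurs in some role iff it is a prefix somewhere or a suffix somewhere
theorem pv_roles_iff (k : Int) (reads : List String) (x : String) :
    (∃ r ∈ reads, ∃ i ∈ PySem.List.pyRange 0 (PySem.Str.len r - k + 1) 1,
        x = pvPrefix k r i ∨ x = pvSuffix k r i) ↔ pvInP k reads x ∨ pvInS k reads x := by
  constructor
  · rintro ⟨r, hr, i, hi, (rfl | rfl)⟩
    · exact Or.inl ⟨r, hr, i, hi, rfl⟩
    · exact Or.inr ⟨r, hr, i, hi, rfl⟩
  · rintro (⟨r, hr, i, hi, rfl⟩ | ⟨r, hr, i, hi, rfl⟩)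
    · exact ⟨r, hr, i, hi, Or.inl rfl⟩
    · exact ⟨r, hr, i, hi, Or.inr rfl⟩

-- keys stay Nodup through the loops
theorem pv_nodup_step (k : Int) (r : String) (d : PySem.Dict String (Bool × Bool)) (i : Int)
    (h : d.keys.Nodup) : (pvStep k r d i).keys.Nodup := by
  unfold pvStep
  exact PySem.Dict.nodup_keys_insert _ _ _ (PySem.Dict.nodup_keys_insert _ _ _ h)

theorem pv_nodup_inner (k : Int) (r : String) (l : List Int)
    (d : PySem.Dict String (Bool × Bool)) (h : d.keys.Nodup) :
    (l.foldl (pvStep k r) d).keys.Nodup := by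
  induction l generalizing d with
  | nil => exact h
  | cons a t ih => exact ih _ (pv_nodup_step k r d a h)

theorem pv_nodup_outer (k : Int) (reads : List String)
    (d : PySem.Dict String (Bool × Bool)) (h : d.keys.Nodup) :
    (reads.foldl (fun d read =>
        (PySem.List.pyRange 0 (PySem.Str.len read - k + 1) 1).foldl (pvStep k read) d) d).keys.Nodup := by
  induction reads generalizing d with
  | nil => exact h
  | cons a t ih => exact ih _ (pv_nodup_inner k a _ d h)

-- all-over-values rephrased over keys (needs unique keys)
theorem pv_values_all (d : PySem.Dict String (Bool × Bool)) (hnd : d.keys.Nodup)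
    (p : (Bool × Bool) → Bool) :
    d.values.all p = true ↔ ∀ x ∈ d.keys, p (d.getD x (false, false)) = true := by
  simp only [PySem.Dict.values, PySem.Dict.keys, List.all_eq_true, List.mem_map]
  constructor
  · intro h x hx
    obtain ⟨⟨xk, v⟩, hmem, hfst⟩ := hx
    cases hfst
    rw [PySem.Dict.getD_of_mem_items _ hmem hnd]
    exact h v ⟨(xk, v), hmem, rfl⟩
  · intro h v hv
    obtain ⟨⟨xk, w⟩, hmem, hsnd⟩ := hv
    cases hsnd
    have := h xk ⟨(xk, w), hmem, rfl⟩
    rwa [PySem.Dict.getD_of_mem_items _ hmem hnd] at this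

theorem isOptimized_spec : Claim_equal_isOptimized := by
  intro k reads hdom
  clear hdom
  show isOptimized k reads = isOptimized_alt k reads
  have hA : isOptimized k reads = true ↔ ∀ x, pvInP k reads x ↔ pvInS k reads x := by
    unfold isOptimized
    simp only []
    rw [PySem.List.foldl_prod_mk
          (f := fun p kmer => PySem.Set.add p (PySem.Str.slice kmer none (some (-1))))
          (g := fun p kmer => PySem.Set.add p (PySem.Str.slice kmer (some 1) none))]
    rw [PySem.Set.equal_iff]
    refine forall_congr' fun x => iff_congr ?_ ?_
    · rw [pv_mem_foldl_add]
      simp only [pv_mem_foldl_add2 reads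
        (fun r => PySem.List.pyRange 0 (PySem.Str.len r - k + 1) 1)
        (fun r i => PySem.Str.slice r (some i) (some (i + k)))]
      constructor
      · rintro (h | ⟨e, he, rfl⟩)
        · simp [PySem.Set.empty] at h
        · rcases he with h0 | ⟨r, hr, i, hi, rfl⟩
          · simp [PySem.Set.empty] at h0
          · exact ⟨r, hr, i, hi, rfl⟩
      · rintro ⟨r, hr, i, hi, rfl⟩
        exact Or.inr ⟨_, Or.inr ⟨r, hr, i, hi, rfl⟩, rfl⟩
    · rw [pv_mem_foldl_add]
      simp only [pv_mem_foldl_add2 reads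
        (fun r => PySem.List.pyRange 0 (PySem.Str.len r - k + 1) 1)
        (fun r i => PySem.Str.slice r (some i) (some (i + k)))]
      constructor
      · rintro (h | ⟨e, he, rfl⟩)
        · simp [PySem.Set.empty] at h
        · rcases he with h0 | ⟨r, hr, i, hi, rfl⟩
          · simp [PySem.Set.empty] at h0
          · exact ⟨r, hr, i, hi, rfl⟩
      · rintro ⟨r, hr, i, hi, rfl⟩
        exact Or.inr ⟨_, Or.inr ⟨r, hr, i, hi, rfl⟩, rfl⟩
  have hB : isOptimized_alt k reads = true ↔
      ∀ x, (pvInP k reads x ∨ pvInS k reads x) → (pvInP k reads x ∧ pvInS k reads x) := by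
    unfold isOptimized_alt
    simp only []
    rw [pv_values_all _ (pv_nodup_outer k reads PySem.Dict.empty PySem.Dict.nodup_keys_empty)]
    constructor
    · intro h x hx
      have hk : x ∈ (reads.foldl (fun d read =>
          (PySem.List.pyRange 0 (PySem.Str.len read - k + 1) 1).foldl (pvStep k read) d)
          PySem.Dict.empty).keys := by
        rw [pv_keys_outer]
        exact Or.inr ((pv_roles_iff k reads x).mpr hx)
      have := h x hk
      simp only [Bool.and_eq_true, pv_getD_outer1, pv_getD_outer2,
        PySem.Dict.getD_empty] at this
      simpa using this
    · intro h x hk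
      rw [pv_keys_outer] at hk
      rcases hk with hk | hk
      · simp [PySem.Dict.keys_empty] at hk
      · have := h x ((pv_roles_iff k reads x).mp hk)
        simp only [Bool.and_eq_true, pv_getD_outer1, pv_getD_outer2, PySem.Dict.getD_empty]
        simpa using this
  have hXY : (∀ x, pvInP k reads x ↔ pvInS k reads x) ↔
      (∀ x, (pvInP k reads x ∨ pvInS k reads x) → (pvInP k reads x ∧ pvInS k reads x)) := by
    constructor
    · intro h x hx
      rcases hx with hx | hx
      · exact ⟨hx, (h x).mp hx⟩
      · exact ⟨(h x).mpr hx, hx⟩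
    · intro h x
      constructor
      · intro hx; exact (h x (Or.inl hx)).2
      · intro hx; exact (h x (Or.inr hx)).1
  rcases hb : isOptimized_alt k reads with _ | _
  · rcases ha : isOptimized k reads with _ | _
    · rfl
    · exfalso
      have := hB.mpr (hXY.mp (hA.mp ha))
      rw [hb] at this
      exact Bool.false_ne_true this
  · exact hA.mpr (hXY.mpr (hB.mp hb))
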